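-- pv_equiv track=rewrite | github.com/nirankusha/ENLENS_Crossodoc | helper_addons.py | build_alignment_map
-- ===== SOURCE A (Python) =====
-- from typing import Dict, List, Tuple, Iterable, Optional, Any, Set
--
-- def build_alignment_map(original: str, resolved: str, replacements: List[Tuple[int,int,str]]) -> List[Tuple[int,int,int,int]]:
--     """
--     Build sparse alignment between original and resolved after replacements.
--     replacements: list of (start,end,rep_text) applied left→right on original.
--     Returns list of (orig_start, orig_end, res_start, res_end) ranges.
--     """
--     spans = []
--     o_cursor = 0
--     r_cursor = 0
--     last = 0
--     res_text = []
--     for s,e,rep in replacements: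
--         # keep original chunk
--         if s > last:
--             chunk = original[last:s]
--             res_text.append(chunk)
--             L = len(chunk)
--             spans.append((last, s, r_cursor, r_cursor+L))
--             r_cursor += L
--         # replaced chunk
--         rep_str = str(rep)
--         res_text.append(rep_str)
--         spans.append((s, e, r_cursor, r_cursor+len(rep_str)))
--         r_cursor += len(rep_str)
--         last = e
--     # tail
--     if last < len(original):
--         chunk = original[last:]
--         res_text.append(chunk)
--         L = len(chunk)
--         spans.append((last, len(original), r_cursor, r_cursor+L))
--         r_cursor += L
--     # sanity: "".join(res_text) == resolved
--     return spans
-- ===== SOURCE B (Python) =====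
-- def build_alignment_map(original: str, resolved: str, replacements):
--     """
--     Two-phase re-implementation: first collect (orig_start, orig_end, out_len)
--     pieces using only `last` as state, then a second pass assigns resolved-side
--     offsets by a running cursor (prefix sums).
--     """
--     pieces = []
--     last = 0
--     for s, e, rep in replacements:
--         if s > last:
--             pieces.append((last, s, len(original[last:s])))
--         pieces.append((s, e, len(str(rep))))
--         last = e
--     if last < len(original):
--         pieces.append((last, len(original), len(original[last:])))
--     spans = []
--     r_cursor = 0
--     for os_, oe, L in pieces:
--         spans.append((os_, oe, r_cursor, r_cursor + L))
--         r_cursor += L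
--     return spans
-- ===== Notes on version B (the rewrite author's own statement) =====
-- stated objective: alternative
-- what changed: A threads the resolved-side cursor through a single interleaved loop; B first builds a list of (orig_start, orig_end, out_len) pieces with only `last` as state, then a separate prefix-sum pass assigns resolved offsets.
import Mathlib
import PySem

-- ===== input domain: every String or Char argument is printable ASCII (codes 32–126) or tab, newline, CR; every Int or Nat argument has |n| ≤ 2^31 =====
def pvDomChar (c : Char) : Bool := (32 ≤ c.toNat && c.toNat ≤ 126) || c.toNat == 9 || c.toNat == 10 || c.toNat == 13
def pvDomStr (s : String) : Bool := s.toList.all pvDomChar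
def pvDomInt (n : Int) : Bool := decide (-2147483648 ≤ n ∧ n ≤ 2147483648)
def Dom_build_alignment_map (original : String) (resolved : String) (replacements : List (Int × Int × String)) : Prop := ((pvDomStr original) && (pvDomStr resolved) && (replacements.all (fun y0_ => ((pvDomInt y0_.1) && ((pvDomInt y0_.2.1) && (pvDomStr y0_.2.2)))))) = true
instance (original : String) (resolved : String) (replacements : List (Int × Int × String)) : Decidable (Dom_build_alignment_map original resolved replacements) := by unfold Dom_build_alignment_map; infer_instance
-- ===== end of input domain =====

-- ===== PORT A =====
-- B builds the piece list first and assigns resolved offsets in a second prefix-sum pass;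
-- A interleaves both in one loop. Equivalence proved on all inputs (A is total).

-- A's loop body (spans, r_cursor, last) for one replacement (s, e, rep)
def pvStepA (o : List Char) (st : List (Int × Int × Int × Int) × Int × Int)
    (t : Int × Int × String) : List (Int × Int × Int × Int) × Int × Int :=
  let s := t.1; let e := t.2.1; let rep := t.2.2
  let spans := st.1; let r_cursor := st.2.1; let last := st.2.2
  -- keep original chunk
  let st1 : List (Int × Int × Int × Int) × Int :=
    if s > last then
      let L : Int := (PySem.List.slice o (some last) (some s)).length
      (spans ++ [(last, s, r_cursor, r_cursor + L)], r_cursor + L)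
    else (spans, r_cursor)
  -- replaced chunk (str(rep) = rep for a str)
  let L2 : Int := PySem.Str.len rep
  (st1.1 ++ [(s, e, st1.2, st1.2 + L2)], st1.2 + L2, e)

def build_alignment_map (original : String) (resolved : String) (replacements : List (Int × Int × String)) : List (Int × Int × Int × Int) :=
  let o := original.toList
  let st := replacements.foldl (pvStepA o) ([], 0, 0)
  let spans := st.1; let r_cursor := st.2.1; let last := st.2.2
  -- tail
  if last < (o.length : Int) then
    let L : Int := (PySem.List.slice o (some last) none).length
    spans ++ [(last, (o.length : Int), r_cursor, r_cursor + L)]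
  else spans

-- ===== PORT B =====
-- B's first-pass body: pieces (orig_start, orig_end, out_len), state is only (pieces, last)
def pvStepB1 (o : List Char) (st : List (Int × Int × Int) × Int)
    (t : Int × Int × String) : List (Int × Int × Int) × Int :=
  let s := t.1; let e := t.2.1; let rep := t.2.2
  let pieces := st.1; let last := st.2
  let pieces :=
    if s > last then
      pieces ++ [(last, s, ((PySem.List.slice o (some last) (some s)).length : Int))]
    else pieces
  (pieces ++ [(s, e, PySem.Str.len rep)], e)

-- B's second-pass body: assign resolved offsets from a running cursor
def pvStepB2 (st : List (Int × Int × Int × Int) × Int)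
    (p : Int × Int × Int) : List (Int × Int × Int × Int) × Int :=
  (st.1 ++ [(p.1, p.2.1, st.2, st.2 + p.2.2)], st.2 + p.2.2)

def build_alignment_map_alt (original : String) (resolved : String) (replacements : List (Int × Int × String)) : List (Int × Int × Int × Int) :=
  let o := original.toList
  let p1 := replacements.foldl (pvStepB1 o) ([], 0)
  let pieces :=
    if p1.2 < (o.length : Int) then
      p1.1 ++ [(p1.2, (o.length : Int), ((PySem.List.slice o (some p1.2) none).length : Int))]
    else p1.1
  (pieces.foldl pvStepB2 ([], 0)).1

-- ===== PRECONDITION & SPEC =====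
def Spec_build_alignment_map (original : String) (resolved : String) (replacements : List (Int × Int × String)) (out : List (Int × Int × Int × Int)) : Prop := out = build_alignment_map_alt original resolved replacements
instance (original : String) (resolved : String) (replacements : List (Int × Int × String)) (out : List (Int × Int × Int × Int)) : Decidable (Spec_build_alignment_map original resolved replacements out) := by unfold Spec_build_alignment_map; infer_instance

-- ===== CLAIM (what is proved, stated in full; the proofs are below) =====
def Claim_equal_build_alignment_map : Prop := ∀ (original : String) (resolved : String) (replacements : List (Int × Int × String)), Dom_build_alignment_map original resolved replacements → Spec_build_alignment_map original resolved replacements (build_alignment_map original resolved replacements)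

-- ===== LEMMAS AND PROOFS =====

-- the piece list and final `last` that B's first pass accumulates, as a structural recursion
def pvPieces (o : List Char) : List (Int × Int × String) → Int → List (Int × Int × Int) × Int
  | [], last => ([], last)
  | (s, e, rep) :: t, last =>
    let g := if s > last then [(last, s, ((PySem.List.slice o (some last) (some s)).length : Int))] else []
    let r := pvPieces o t e
    (g ++ (s, e, PySem.Str.len rep) :: r.1, r.2)

-- B's second pass (offset assignment), as a structural recursion
def pvEmit : List (Int × Int × Int) → Int → List (Int × Int × Int × Int)
  | [], _ => []
  | (a, b, L) :: t, r => (a, b, r, r + L) :: pvEmit t (r + L)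

def pvSumL (ps : List (Int × Int × Int)) : Int := (ps.map (fun p => p.2.2)).sum

theorem pvEmit_append (xs ys : List (Int × Int × Int)) (r : Int) :
    pvEmit (xs ++ ys) r = pvEmit xs r ++ pvEmit ys (r + pvSumL xs) := by
  induction xs generalizing r with
  | nil => simp [pvEmit, pvSumL]
  | cons x t ih =>
    obtain ⟨a, b, L⟩ := x
    simp only [List.cons_append, pvEmit, ih, pvSumL, List.map_cons, List.sum_cons, add_assoc]

theorem pvFoldB1 (o : List Char) (reps : List (Int × Int × String))
    (acc : List (Int × Int × Int)) (last : Int) :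
    reps.foldl (pvStepB1 o) (acc, last)
    = (acc ++ (pvPieces o reps last).1, (pvPieces o reps last).2) := by
  induction reps generalizing acc last with
  | nil => simp [pvPieces]
  | cons x t ih =>
    obtain ⟨s, e, rep⟩ := x
    rw [List.foldl_cons]
    have hstep : pvStepB1 o (acc, last) (s, e, rep)
        = ((acc ++ (if s > last then [(last, s, ((PySem.List.slice o (some last) (some s)).length : Int))] else [])) ++ [(s, e, PySem.Str.len rep)], e) := by
      by_cases h : s > last <;> simp [pvStepB1, h]
    rw [hstep, ih]
    by_cases h : s > last <;> simp [pvPieces, h, List.append_assoc]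

theorem pvFoldB2 (ps : List (Int × Int × Int))
    (acc : List (Int × Int × Int × Int)) (r : Int) :
    ps.foldl pvStepB2 (acc, r) = (acc ++ pvEmit ps r, r + pvSumL ps) := by
  induction ps generalizing acc r with
  | nil => simp [pvEmit, pvSumL]
  | cons p t ih =>
    obtain ⟨a, b, L⟩ := p
    rw [List.foldl_cons, show pvStepB2 (acc, r) (a, b, L) = (acc ++ [(a, b, r, r + L)], r + L) from rfl, ih]
    simp [pvEmit, pvSumL, List.append_assoc, add_assoc]

theorem pvFoldA (o : List Char) (reps : List (Int × Int × String))
    (acc : List (Int × Int × Int × Int)) (r last : Int) :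
    reps.foldl (pvStepA o) (acc, r, last)
    = (acc ++ pvEmit (pvPieces o reps last).1 r,
       r + pvSumL (pvPieces o reps last).1, (pvPieces o reps last).2) := by
  induction reps generalizing acc r last with
  | nil => simp [pvPieces, pvEmit, pvSumL]
  | cons x t ih =>
    obtain ⟨s, e, rep⟩ := x
    rw [List.foldl_cons]
    by_cases h : s > last
    · have hstep : pvStepA o (acc, r, last) (s, e, rep)
          = (acc ++ [(last, s, r, r + ((PySem.List.slice o (some last) (some s)).length : Int)),
                     (s, e, r + ((PySem.List.slice o (some last) (some s)).length : Int),
                      r + ((PySem.List.slice o (some last) (some s)).length : Int) + PySem.Str.len rep)],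
             r + ((PySem.List.slice o (some last) (some s)).length : Int) + PySem.Str.len rep, e) := by
        simp [pvStepA, h]
      rw [hstep, ih]
      simp [pvPieces, pvEmit, pvSumL, h, List.append_assoc, add_assoc]
    · have hstep : pvStepA o (acc, r, last) (s, e, rep)
          = (acc ++ [(s, e, r, r + PySem.Str.len rep)], r + PySem.Str.len rep, e) := by
        simp [pvStepA, h]
      rw [hstep, ih]
      simp [pvPieces, pvEmit, pvSumL, h, List.append_assoc, add_assoc]

-- ===== VERDICT (by name: the statement is the Claim_ definition above) =====
theorem build_alignment_map_spec : Claim_equal_build_alignment_map := by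
  intro original resolved replacements _
  unfold Spec_build_alignment_map build_alignment_map build_alignment_map_alt
  simp only [pvFoldA, pvFoldB1, List.nil_append]
  by_cases h : (pvPieces original.toList replacements 0).2 < ((original.length : Nat) : Int)
  · rw [if_pos (by simpa using h), if_pos (by simpa using h), pvFoldB2, pvEmit_append]
    simp [pvEmit]
  · rw [if_neg (by simpa using h), if_neg (by simpa using h), pvFoldB2]
    simp
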